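-- pv_equiv track=rewrite | github.com/UiPath/uipath-python | packages/uipath/src/uipath/eval/evaluators/legacy_csv_exact_match_evaluator.py | _do_values_match
-- ===== SOURCE A (Python) =====
-- def _do_values_match(
--     actual_values: dict[str, str], expected_values: dict[str, str]
-- ) -> bool:
--     """Compare actual and expected values.
--
--     Args:
--         actual_values: Dictionary of actual column values
--         expected_values: Dictionary of expected column values
--
--     Returns:
--         True if all values match exactly, False otherwise
--     """
--     for column, expected_value in expected_values.items():
--         actual_value = actual_values.get(column)
--         # Use exact string comparison (case-sensitive for values)
--         if actual_value != expected_value: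
--             return False
--     return True
-- ===== SOURCE B (Python) =====
-- def _do_values_match(
--     actual_values: dict[str, str], expected_values: dict[str, str]
-- ) -> bool:
--     # Overlay-and-compare: merging the expected pairs over the actual dict
--     # leaves it unchanged exactly when every expected pair already matches.
--     return {**actual_values, **expected_values} == actual_values
-- ===== Notes on version B (the rewrite author's own statement) =====
-- stated objective: alternative
-- what changed: Replaced the per-key lookup-and-compare loop by a dict overlay plus whole-dict equality: {**actual, **expected} == actual, which is unchanged iff every expected pair already matches.
import Mathlib
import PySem

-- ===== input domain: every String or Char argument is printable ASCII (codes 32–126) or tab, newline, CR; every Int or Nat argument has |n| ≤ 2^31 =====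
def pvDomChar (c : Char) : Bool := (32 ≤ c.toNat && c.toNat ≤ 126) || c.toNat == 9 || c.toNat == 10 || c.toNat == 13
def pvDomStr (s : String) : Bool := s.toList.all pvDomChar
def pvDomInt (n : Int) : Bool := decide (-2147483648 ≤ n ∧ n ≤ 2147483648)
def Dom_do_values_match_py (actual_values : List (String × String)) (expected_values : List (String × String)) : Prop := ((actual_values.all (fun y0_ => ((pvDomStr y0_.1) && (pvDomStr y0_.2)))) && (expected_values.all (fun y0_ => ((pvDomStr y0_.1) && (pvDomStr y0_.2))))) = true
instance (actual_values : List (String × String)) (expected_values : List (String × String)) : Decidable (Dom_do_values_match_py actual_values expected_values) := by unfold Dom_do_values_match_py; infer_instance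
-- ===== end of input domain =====

-- B replaces A's per-key lookup loop by a dict overlay plus whole-dict equality ({**actual, **expected} == actual).

-- ===== PORT A =====
-- the 'for column, expected_value in expected_values.items(): … return False' loop
def pvALoop (actual : PySem.Dict String String) : List (String × String) → Bool
  | [] => true
  | (column, expected_value) :: rest =>
      if actual.get? column ≠ some expected_value then false
      else pvALoop actual rest

def do_values_match_py (actual_values : List (String × String)) (expected_values : List (String × String)) : Bool :=
  pvALoop (PySem.Dict.ofList actual_values) (PySem.Dict.ofList expected_values).items

-- ===== PORT B =====
-- {**d1, **d2}: start from d1, insert every pair of d2 (overwrite in place, new keys append)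
def pvOverlay (d1 d2 : PySem.Dict String String) : PySem.Dict String String :=
  d2.items.foldl (fun d p => d.insert p.1 p.2) d1

-- Python's 'dict == dict' (order-insensitive): same number of keys and every pair of d1 looked up in d2
def pvPyDictEq (d1 d2 : PySem.Dict String String) : Bool :=
  d1.size == d2.size && d1.items.all (fun p => d2.get? p.1 == some p.2)

def do_values_match_py_alt (actual_values : List (String × String)) (expected_values : List (String × String)) : Bool :=
  pvPyDictEq (pvOverlay (PySem.Dict.ofList actual_values) (PySem.Dict.ofList expected_values))
    (PySem.Dict.ofList actual_values)

-- ===== PRECONDITION & SPEC =====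
def Spec_do_values_match_py (actual_values : List (String × String)) (expected_values : List (String × String)) (out : Bool) : Prop := out = do_values_match_py_alt actual_values expected_values
instance (actual_values : List (String × String)) (expected_values : List (String × String)) (out : Bool) : Decidable (Spec_do_values_match_py actual_values expected_values out) := by unfold Spec_do_values_match_py; infer_instance

-- ===== CLAIM (what is proved, stated in full; the proofs are below) =====
def Claim_equal_do_values_match_py : Prop := ∀ (actual_values : List (String × String)) (expected_values : List (String × String)), Dom_do_values_match_py actual_values expected_values → Spec_do_values_match_py actual_values expected_values (do_values_match_py actual_values expected_values)

-- ===== LEMMAS AND PROOFS =====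

-- A's early-exit loop is the 'all' of its per-pair test.
theorem pvALoop_eq_all (actual : PySem.Dict String String) (l : List (String × String)) :
    pvALoop actual l = l.all (fun p => actual.get? p.1 == some p.2) := by
  induction l with
  | nil => rfl
  | cons p rest ih =>
    obtain ⟨c, v⟩ := p
    simp only [pvALoop, List.all_cons, ih]
    by_cases h : actual.get? c = some v
    · simp [h]
    · simp [h]

-- lookup in a fold of inserts over a nodup-key pair list: list lookup first, base dict second
theorem foldl_insert_get? (l : List (String × String)) (hnd : (l.map Prod.fst).Nodup)
    (d : PySem.Dict String String) (k : String) :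
    (l.foldl (fun d p => d.insert p.1 p.2) d).get? k = ((l.lookup k).or (d.get? k)) := by
  induction l generalizing d with
  | nil => simp [List.lookup]
  | cons p rest ih =>
    obtain ⟨c, v⟩ := p
    simp only [List.map_cons, List.nodup_cons] at hnd
    simp only [List.foldl_cons]
    rw [ih hnd.2]
    by_cases hk : k = c
    · subst hk
      have hnone : rest.lookup k = none := by
        rw [List.lookup_eq_none_iff]
        intro p hp
        have : p.1 ≠ k := fun h => hnd.1 (List.mem_map.2 ⟨p, hp, h⟩)
        simpa [bne] using Ne.symm this
      simp [List.lookup, hnone, PySem.Dict.get?_insert_self]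
    · have hb : (k == c) = false := by simp [hk]
      simp [List.lookup, hb, PySem.Dict.get?_insert, hk]

-- lookup of a member pair in a nodup-key list
theorem lookup_of_mem_nodup (l : List (String × String)) (hnd : (l.map Prod.fst).Nodup)
    (k : String) (v : String) (hm : (k, v) ∈ l) : l.lookup k = some v := by
  induction l with
  | nil => cases hm
  | cons p rest ih =>
    obtain ⟨c, w⟩ := p
    simp only [List.map_cons, List.nodup_cons] at hnd
    rcases List.mem_cons.1 hm with h | h
    · cases h; simp [List.lookup]
    · have hkc : (k == c) = false := by
        simp only [beq_eq_false_iff_ne]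
        intro hkc
        subst hkc
        exact hnd.1 (List.mem_map.2 ⟨_, h, rfl⟩)
      simpa [List.lookup, hkc] using ih hnd.2 h

-- inserting a pair the dict already holds changes nothing
theorem insert_noop (d : PySem.Dict String String) (k v : String)
    (hnd : d.keys.Nodup) (h : d.get? k = some v) : d.insert k v = d := by
  have hc : d.contains k = true := by
    rw [PySem.Dict.contains_eq_isSome_get?, h]; rfl
  apply PySem.Dict.ext
  rw [PySem.Dict.items_insert, if_pos hc]
  have hmap : d.items.map (fun p => if (p.1 == k) = true then (k, v) else p)
      = d.items.map id := by
    apply List.map_congr_left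
    intro p hp
    by_cases hpk : (p.1 == k) = true
    · have hk : p.1 = k := by simpa using hpk
      have hv : d.get? p.1 = some p.2 := PySem.Dict.get?_of_mem_items _ hp hnd
      rw [hk, h] at hv
      cases p
      simp_all
    · simp [hpk]
  rw [hmap, List.map_id]

-- a fold of already-matching inserts is the identity
theorem foldl_insert_noop (l : List (String × String)) (d : PySem.Dict String String)
    (hnd : d.keys.Nodup) (h : ∀ p ∈ l, d.get? p.1 = some p.2) :
    l.foldl (fun d p => d.insert p.1 p.2) d = d := by
  induction l with
  | nil => rfl
  | cons p rest ih =>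
    simp only [List.foldl_cons]
    rw [insert_noop d p.1 p.2 hnd (h p (List.mem_cons_self ..))]
    exact ih fun q hq => h q (List.mem_cons_of_mem _ hq)

-- core: the overlay-equality test equals the per-pair 'all' test
theorem overlay_eq_all (a e : List (String × String)) :
    pvPyDictEq (pvOverlay (PySem.Dict.ofList a) (PySem.Dict.ofList e)) (PySem.Dict.ofList a)
      = (PySem.Dict.ofList e).items.all
          (fun p => (PySem.Dict.ofList a).get? p.1 == some p.2) := by
  set A := PySem.Dict.ofList a with hA
  set E := PySem.Dict.ofList e with hE
  have hndA : A.keys.Nodup := PySem.Dict.nodup_keys_ofList a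
  have hndE : (E.items.map Prod.fst).Nodup := PySem.Dict.nodup_keys_ofList e
  by_cases h : ∀ p ∈ E.items, A.get? p.1 = some p.2
  · -- every expected pair already matches: overlay is the identity, both sides true
    have hrhs : E.items.all (fun p => A.get? p.1 == some p.2) = true := by
      rw [List.all_eq_true]
      intro p hp
      simp [h p hp]
    rw [hrhs]
    unfold pvOverlay
    rw [foldl_insert_noop _ _ hndA h]
    simp only [pvPyDictEq, beq_self_eq_true, Bool.true_and]
    rw [List.all_eq_true]
    intro p hp
    simp [PySem.Dict.get?_of_mem_items _ hp hndA]
  · -- some pair fails: both sides false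
    push Not at h
    obtain ⟨⟨k, v⟩, hmem, hne⟩ := h
    have hrhs : E.items.all (fun p => A.get? p.1 == some p.2) = false := by
      rw [List.all_eq_false]
      exact ⟨(k, v), hmem, by simpa using hne⟩
    rw [hrhs]
    set M := pvOverlay A E with hM
    have hget : ∀ x, M.get? x = ((E.items.lookup x).or (A.get? x)) :=
      foldl_insert_get? E.items hndE A
    have hLk : E.items.lookup k = some v := lookup_of_mem_nodup E.items hndE k v hmem
    have hMk : M.get? k = some v := by rw [hget k, hLk]; rfl
    cases hAk : A.get? k with
    | none =>
      -- a brand-new key: the overlay has strictly more keys, the size test fails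
      have hkeysM : M.keys = PySem.Set.update A.keys (E.items.map Prod.fst) := by
        rw [hM]
        unfold pvOverlay
        exact PySem.Dict.keys_foldl_insert_key E.items Prod.fst (fun _ p => p.2) A
      have hkA : k ∉ A.keys := (PySem.Dict.get?_eq_none_iff_not_mem_keys _ _).1 hAk
      have hkM : k ∈ M.keys := by
        by_contra hc
        rw [← PySem.Dict.get?_eq_none_iff_not_mem_keys _ _] at hc
        rw [hc] at hMk
        cases hMk
      have hlen : A.keys.length < M.keys.length := by
        rw [hkeysM, PySem.Set.update_eq_append_filter, List.length_append]
        have hfil : k ∈ (PySem.Set.ofList (E.items.map Prod.fst)).filter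
            (fun y => !(PySem.Set.contains A.keys y)) := by
          rw [List.mem_filter]
          refine ⟨(PySem.Set.mem_ofList _ _).2 (List.mem_map.2 ⟨(k, v), hmem, rfl⟩), ?_⟩
          simpa [PySem.Set.contains] using hkA
        have := List.length_pos_of_mem hfil
        omega
      have hsize : (M.size == A.size) = false := by
        have hMs : M.size = M.items.length := rfl
        have hAs : A.size = A.items.length := rfl
        have hKM : M.keys.length = M.items.length := by
          simp [PySem.Dict.keys]
        have hKA : A.keys.length = A.items.length := by
          simp [PySem.Dict.keys]
        simp only [beq_eq_false_iff_ne, Ne, hMs, hAs]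
        omega
      simp [pvPyDictEq, hsize]
    | some w =>
      -- key present with a different value: the pair test fails at (k, v)
      have hvw : v ≠ w := by
        intro hvw
        rw [hvw] at hne
        exact hne hAk
      have hMitems : (k, v) ∈ M.items := PySem.Dict.mem_items_of_get?_eq_some _ hMk
      have hall : M.items.all (fun p => A.get? p.1 == some p.2) = false := by
        rw [List.all_eq_false]
        refine ⟨(k, v), hMitems, ?_⟩
        simp only [hAk]
        simpa using Ne.symm hvw
      simp [pvPyDictEq, hall]

-- ===== VERDICT (by name: the statement is the Claim_ definition above) =====
theorem do_values_match_py_spec : Claim_equal_do_values_match_py := by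
  intro a e _
  unfold Spec_do_values_match_py do_values_match_py do_values_match_py_alt
  rw [pvALoop_eq_all, overlay_eq_all]
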